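-- pv_equiv track=rewrite | github.com/CheesyGamer77/DungeonWhisperer | cogs/embeds.py | __remove_all_dict_keys_except
-- ===== SOURCE A (Python) =====
-- from typing import Any, Generator, List, Optional
--
-- def __remove_all_dict_keys_except(d: dict, key: Any) -> dict:
--     # no, you cannot just iterate over each dict key and delete it on the fly
--     # python gets very angry at you and raises a RuntimeError if you try to do that
--
--     data = d
--     to_remove = []
--     for k in data.keys():
--         if k != key:
--             to_remove.append(k)
--
--     # now we can actually delete the keys
--     for k in to_remove:
--         del data[k]
--
--     return data
-- ===== SOURCE B (Python) =====
-- def __remove_all_dict_keys_except(d: dict, key) -> dict: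
--     # save the surviving entry (if any), wipe the dict, restore it -- no key iteration
--     keep = {key: d[key]} if key in d else {}
--     d.clear()
--     d.update(keep)
--     return d
-- ===== Notes on version B (the rewrite author's own statement) =====
-- stated objective: simpler
-- what changed: Replaces the collect-then-delete double loop over the keys with a loop-free save/clear/restore of the single surviving entry (keep = {key: d[key]} if key in d else {}; d.clear(); d.update(keep)).
import Mathlib
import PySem

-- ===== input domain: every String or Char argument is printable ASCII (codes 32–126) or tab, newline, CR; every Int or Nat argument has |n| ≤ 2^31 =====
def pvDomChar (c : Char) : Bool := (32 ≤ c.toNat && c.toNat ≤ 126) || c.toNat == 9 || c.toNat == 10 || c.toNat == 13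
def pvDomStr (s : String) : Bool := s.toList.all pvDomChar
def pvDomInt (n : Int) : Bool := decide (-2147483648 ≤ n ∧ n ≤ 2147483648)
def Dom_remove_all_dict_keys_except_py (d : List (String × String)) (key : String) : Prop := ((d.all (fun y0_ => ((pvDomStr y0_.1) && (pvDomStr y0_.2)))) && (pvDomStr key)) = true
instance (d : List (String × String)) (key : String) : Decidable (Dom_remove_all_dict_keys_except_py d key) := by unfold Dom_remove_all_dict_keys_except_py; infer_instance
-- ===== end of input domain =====

-- B replaces A's collect-then-delete key loops by a loop-free save/clear/restore of the one
-- surviving entry (objective: simpler). Both Pythons mutate the same dict object in place and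
-- return it (A deletes keys, B clears and repopulates); the equivalence proved here is about
-- the returned value.

-- ===== PORT A =====
-- the dict parameter arrives as an association list; building the Python dict from it is
-- PySem.Dict.ofList (last value wins, first position kept), Python-exact
def remove_all_dict_keys_except_py (d : List (String × String)) (key : String) : List (String × String) :=
  let data := PySem.Dict.ofList d
  let to_remove :=
    data.keys.foldl (fun acc k => if k != key then acc ++ [k] else acc) ([] : List String)
  (to_remove.foldl (fun dd k => dd.erase k) data).items

-- ===== PORT B =====
def remove_all_dict_keys_except_py_alt (d : List (String × String)) (key : String) : List (String × String) :=
  let data := PySem.Dict.ofList d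
  -- keep = {key: d[key]} if key in d else {}; d.clear(); d.update(keep); return d
  match data.get? key with
  | some v => [(key, v)]
  | none => []

-- ===== PRECONDITION & SPEC =====
def Spec_remove_all_dict_keys_except_py (d : List (String × String)) (key : String) (out : List (String × String)) : Prop := out = remove_all_dict_keys_except_py_alt d key
instance (d : List (String × String)) (key : String) (out : List (String × String)) : Decidable (Spec_remove_all_dict_keys_except_py d key out) := by unfold Spec_remove_all_dict_keys_except_py; infer_instance

-- ===== CLAIM (what is proved, stated in full; the proofs are below) =====
def Claim_equal_remove_all_dict_keys_except_py : Prop := ∀ (d : List (String × String)) (key : String), Dom_remove_all_dict_keys_except_py d key → Spec_remove_all_dict_keys_except_py d key (remove_all_dict_keys_except_py d key)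

-- ===== LEMMAS AND PROOFS =====

-- folding `erase` over a key list filters the items by non-membership of their key
lemma foldl_erase_items (ks : List String) (dd : PySem.Dict String String) :
    (ks.foldl (fun a k => a.erase k) dd).items
      = dd.items.filter (fun p => !(ks.contains p.1)) := by
  induction ks generalizing dd with
  | nil => simp
  | cons k ks ih =>
      rw [List.foldl_cons, ih]
      show (dd.items.filter (fun p => !(p.1 == k))).filter (fun p => !(ks.contains p.1))
            = dd.items.filter (fun p => !((k :: ks).contains p.1))
      rw [List.filter_filter]
      apply List.filter_congr
      intro p _
      rw [List.contains_cons]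
      cases h : p.1 == k <;> cases h2 : ks.contains p.1 <;> simp [*]

-- an item list with Nodup keys filtered down to one key is exactly the first-match lookup
lemma filter_key_eq (key : String) :
    ∀ (l : List (String × String)), (l.map Prod.fst).Nodup →
      l.filter (fun p => p.1 == key)
        = (match (PySem.Dict.mk l).get? key with
           | some v => [(key, v)]
           | none => ([] : List (String × String))) := by
  intro l
  induction l with
  | nil => intro _; rfl
  | cons p rest ih =>
      intro hnd
      obtain ⟨k, v⟩ := p
      simp only [List.map_cons, List.nodup_cons] at hnd
      rw [List.filter_cons, PySem.Dict.get?_mk_cons]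
      by_cases hk : k = key
      · subst hk
        have hrest : rest.filter (fun p => p.1 == k) = [] := by
          apply List.filter_eq_nil_iff.mpr
          intro q hq hb
          exact hnd.1 (by
            have hq1 : q.1 = k := by simpa using hb
            exact hq1 ▸ List.mem_map_of_mem hq)
        simp [hrest]
      · have hb2 : ((k, v).1 == key) = false := by simpa using hk
        simp only [hb2, Bool.false_eq_true, ite_false]
        exact ih hnd.2

theorem remove_all_dict_keys_except_py_eq (d : List (String × String)) (key : String) :
    remove_all_dict_keys_except_py d key = remove_all_dict_keys_except_py_alt d key := by
  unfold remove_all_dict_keys_except_py remove_all_dict_keys_except_py_alt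
  have hnd : (PySem.Dict.ofList d).keys.Nodup := PySem.Dict.nodup_keys_ofList d
  have hto : (PySem.Dict.ofList d).keys.foldl
        (fun acc k => if k != key then acc ++ [k] else acc) ([] : List String)
      = (PySem.Dict.ofList d).keys.filter (fun k => k != key) := by
    simpa using PySem.List.foldl_append_if (fun k => k != key) (fun k => k)
      (PySem.Dict.ofList d).keys []
  simp only [hto, foldl_erase_items]
  have hkeys : (PySem.Dict.ofList d).keys = (PySem.Dict.ofList d).items.map Prod.fst := rfl
  have hstep : (PySem.Dict.ofList d).items.filter
      (fun p => !(((PySem.Dict.ofList d).keys.filter (fun k => k != key)).contains p.1))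
      = (PySem.Dict.ofList d).items.filter (fun p => p.1 == key) := by
    apply List.filter_congr
    intro p hp
    have hmem : p.1 ∈ (PySem.Dict.ofList d).keys := hkeys ▸ List.mem_map_of_mem hp
    simp [hmem, Bool.beq_eq_decide_eq]
  rw [hstep, filter_key_eq key (PySem.Dict.ofList d).items (by simpa [hkeys] using hnd)]

-- ===== VERDICT (by name: the statement is the Claim_ definition above) =====
theorem remove_all_dict_keys_except_py_spec : Claim_equal_remove_all_dict_keys_except_py := by
  intro d key _
  exact remove_all_dict_keys_except_py_eq d key
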